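-- pv_equiv track=rewrite | github.com/andrewbo29/Arabic_Lang_Recognition | decompose/centralline.py | findZeros
-- ===== SOURCE A (Python) =====
-- def findZeros(a):
--     zeros = []
--     x = findZero(a, 0)
--     while x is not None:
--         zeros.append(x)
--         if x[1] >= len(a):
--             break
--         x = findZero(a, x[1])
--     return zeros
--
-- def findZero(a, s):
--     while s < len(a) and a[s] != 0:
--         s += 1
--     if s < len(a):
--         start = s
--         while s < len(a) and a[s] == 0:
--             s += 1
--         return start, s
--     return None
-- ===== SOURCE B (Python) =====
-- def findZeros(a):
--     runs = []
--     start = None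
--     for i, x in enumerate(a):
--         if x == 0:
--             if start is None:
--                 start = i
--         elif start is not None:
--             runs.append((start, i))
--             start = None
--     if start is not None:
--         runs.append((start, len(a)))
--     return runs
-- ===== Notes on version B (the rewrite author's own statement) =====
-- stated objective: simpler
-- what changed: Replaced A's two-level structure (a findZero helper with two inner while-loops, restarted by a driver loop) with a single pass over enumerate(a) that keeps an optional current-run start and closes runs as it goes.
import Mathlib
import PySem

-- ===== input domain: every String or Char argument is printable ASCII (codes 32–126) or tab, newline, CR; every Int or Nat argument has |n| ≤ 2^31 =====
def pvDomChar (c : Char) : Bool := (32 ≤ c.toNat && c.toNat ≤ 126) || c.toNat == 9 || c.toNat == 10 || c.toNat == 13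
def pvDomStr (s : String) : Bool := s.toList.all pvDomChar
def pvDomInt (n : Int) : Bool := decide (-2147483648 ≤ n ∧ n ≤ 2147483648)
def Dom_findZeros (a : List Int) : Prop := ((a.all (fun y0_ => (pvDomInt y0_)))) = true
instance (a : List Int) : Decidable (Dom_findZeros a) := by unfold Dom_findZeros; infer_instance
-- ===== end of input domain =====

-- B replaces A's findZero helper + driver with one single pass keeping an optional run start (objective: simpler).

-- ===== PORT A =====
-- The while loops are given the fuel a.length (resp. a.length + 1 driver rounds), an upper bound on
-- their iteration count, so recursion is structural; the fuel is never exhausted (guard only).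
-- inner 'while s < len(a) and a[s] != 0: s += 1' of findZero
def skipNZ (a : List Int) (s : Nat) : Nat → Nat
  | 0 => s
  | fuel + 1 => if s < a.length ∧ a.getD s 0 ≠ 0 then skipNZ a (s + 1) fuel else s

-- inner 'while s < len(a) and a[s] == 0: s += 1' of findZero
def skipZ (a : List Int) (s : Nat) : Nat → Nat
  | 0 => s
  | fuel + 1 => if s < a.length ∧ a.getD s 0 = 0 then skipZ a (s + 1) fuel else s

-- helper findZero(a, s)
def findZeroA (a : List Int) (s : Nat) : Option (Nat × Nat) :=
  let s' := skipNZ a s a.length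
  if s' < a.length then some (s', skipZ a s' a.length) else none

-- driver loop of findZeros(a), continuing from position s
def findZerosFrom (a : List Int) (fuel : Nat) (s : Nat) : List (Nat × Nat) :=
  match fuel with
  | 0 => []
  | fuel + 1 =>
    match findZeroA a s with
    | none => []
    | some x => x :: (if a.length ≤ x.2 then [] else findZerosFrom a fuel x.2)

def findZeros (a : List Int) : List (Int × Int) :=
  (findZerosFrom a (a.length + 1) 0).map (fun p => ((p.1 : Int), (p.2 : Int)))

-- ===== PORT B =====
-- loop body of B's single pass: state = (runs so far, optional start of the current zero run)
def bStep (st : List (Int × Int) × Option Int) (p : Int × Int) : List (Int × Int) × Option Int :=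
  if p.2 = 0 then
    match st.2 with
    | none => (st.1, some p.1)
    | some s => (st.1, some s)
  else
    match st.2 with
    | some s => (st.1 ++ [(s, p.1)], none)
    | none => st

def findZeros_alt (a : List Int) : List (Int × Int) :=
  let r := (PySem.List.enumerate a).foldl bStep ([], none)
  match r.2 with
  | some s => r.1 ++ [(s, (a.length : Int))]
  | none => r.1

-- ===== PRECONDITION & SPEC =====
def Spec_findZeros (a : List Int) (out : List (Int × Int)) : Prop := out = findZeros_alt a
instance (a : List Int) (out : List (Int × Int)) : Decidable (Spec_findZeros a out) := by unfold Spec_findZeros; infer_instance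

-- ===== CLAIM (what is proved, stated in full; the proofs are below) =====
def Claim_equal_findZeros : Prop := ∀ (a : List Int), Dom_findZeros a → Spec_findZeros a (findZeros a)

-- ===== LEMMAS AND PROOFS =====

-- the common characterisation: zero runs of l, positions counted from i, with an optional open run start
def RI : List Int → Int → Option Int → List (Int × Int)
  | [], _, none => []
  | [], i, some s => [(s, i)]
  | x :: xs, i, none => if x = 0 then RI xs (i + 1) (some i) else RI xs (i + 1) none
  | x :: xs, i, some s => if x = 0 then RI xs (i + 1) (some s) else (s, i) :: RI xs (i + 1) none

-- B's fold computes RI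
theorem bfold (l : List Int) (i : Int) (acc : List (Int × Int)) (ost : Option Int) :
    (match ((PySem.List.enumerate l i).foldl bStep (acc, ost)).2 with
      | some s => ((PySem.List.enumerate l i).foldl bStep (acc, ost)).1 ++ [(s, i + (l.length : Int))]
      | none => ((PySem.List.enumerate l i).foldl bStep (acc, ost)).1)
    = acc ++ RI l i ost := by
  induction l generalizing i acc ost with
  | nil =>
    cases ost <;> simp [PySem.List.enumerate_nil, RI]
  | cons x xs ih =>
    rw [PySem.List.enumerate_cons]
    simp only [List.foldl_cons]
    have hlen : i + ((x :: xs).length : Int) = (i + 1) + (xs.length : Int) := by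
      simp [List.length_cons]; ring
    rw [hlen]
    by_cases hx : x = 0
    · cases ost with
      | none => simp only [bStep, hx]; rw [ih]; simp [RI]
      | some s => simp only [bStep, hx]; rw [ih]; simp [RI]
    · cases ost with
      | none => simp only [bStep, hx]; rw [ih]; simp [RI, hx]
      | some s => simp only [bStep, hx]; rw [ih]; simp [RI, hx]

theorem alt_eq_RI (a : List Int) : findZeros_alt a = RI a 0 none := by
  have h := bfold a 0 [] none
  simp only [zero_add, List.nil_append] at h
  unfold findZeros_alt
  exact h

-- basic facts about the fuelled while loops
theorem skipZ_ge (a : List Int) : ∀ (f s : Nat), s ≤ skipZ a s f := by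
  intro f
  induction f with
  | zero => intro s; simp [skipZ]
  | succ f ih =>
    intro s
    rw [skipZ]
    split
    · exact le_trans (by omega) (ih (s + 1))
    · exact le_refl s

theorem skipZ_le (a : List Int) : ∀ (f s : Nat), s ≤ a.length → skipZ a s f ≤ a.length := by
  intro f
  induction f with
  | zero => intro s h; simpa [skipZ] using h
  | succ f ih =>
    intro s h
    rw [skipZ]
    split
    · rename_i hc; exact ih (s + 1) (by omega)
    · exact h

theorem skipZ_zero (a : List Int) (s : Nat) : skipZ a s 0 = s := rfl

theorem skipZ_succ_eq (a : List Int) (s f : Nat) :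
    skipZ a s (f + 1) = if s < a.length ∧ a.getD s 0 = 0 then skipZ a (s + 1) f else s := rfl

theorem skipNZ_zero (a : List Int) (s : Nat) : skipNZ a s 0 = s := rfl

theorem skipNZ_succ_eq (a : List Int) (s f : Nat) :
    skipNZ a s (f + 1) = if s < a.length ∧ a.getD s 0 ≠ 0 then skipNZ a (s + 1) f else s := rfl

-- the guard-fuel is irrelevant as long as it suffices
theorem skipZ_fuel_step (a : List Int) : ∀ (f s : Nat), a.length - s ≤ f →
    skipZ a s (f + 1) = skipZ a s f := by
  intro f
  induction f with
  | zero =>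
    intro s hf
    rw [skipZ_succ_eq, if_neg (fun h => absurd h.1 (by omega)), skipZ_zero]
  | succ f ih =>
    intro s hf
    rw [skipZ_succ_eq a s (f + 1), skipZ_succ_eq a s f]
    by_cases hc : s < a.length ∧ a.getD s 0 = 0
    · rw [if_pos hc, if_pos hc]
      exact ih (s + 1) (by omega)
    · rw [if_neg hc, if_neg hc]

theorem skipNZ_fuel_step (a : List Int) : ∀ (f s : Nat), a.length - s ≤ f →
    skipNZ a s (f + 1) = skipNZ a s f := by
  intro f
  induction f with
  | zero =>
    intro s hf
    rw [skipNZ_succ_eq, if_neg (fun h => absurd h.1 (by omega)), skipNZ_zero]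
  | succ f ih =>
    intro s hf
    rw [skipNZ_succ_eq a s (f + 1), skipNZ_succ_eq a s f]
    by_cases hc : s < a.length ∧ a.getD s 0 ≠ 0
    · rw [if_pos hc, if_pos hc]
      exact ih (s + 1) (by omega)
    · rw [if_neg hc, if_neg hc]

theorem skipZ_eq_self (a : List Int) (f s : Nat) (h : ¬(s < a.length ∧ a.getD s 0 = 0)) :
    skipZ a s f = s := by
  cases f with
  | zero => rfl
  | succ f => rw [skipZ_succ_eq, if_neg h]

theorem skipNZ_eq_self (a : List Int) (f s : Nat) (h : ¬(s < a.length ∧ a.getD s 0 ≠ 0)) :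
    skipNZ a s f = s := by
  cases f with
  | zero => rfl
  | succ f => rw [skipNZ_succ_eq, if_neg h]

theorem skipZ_succ (a : List Int) (s : Nat) (h1 : s < a.length) (h2 : a.getD s 0 = 0) :
    skipZ a s a.length = skipZ a (s + 1) a.length := by
  obtain ⟨n, hn⟩ : ∃ n, a.length = n + 1 := ⟨a.length - 1, by omega⟩
  rw [hn, skipZ_succ_eq, if_pos ⟨by omega, h2⟩]
  exact (skipZ_fuel_step a n (s + 1) (by omega)).symm

theorem skipNZ_succ (a : List Int) (s : Nat) (h1 : s < a.length) (h2 : a.getD s 0 ≠ 0) :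
    skipNZ a s a.length = skipNZ a (s + 1) a.length := by
  obtain ⟨n, hn⟩ : ∃ n, a.length = n + 1 := ⟨a.length - 1, by omega⟩
  rw [hn, skipNZ_succ_eq, if_pos ⟨by omega, h2⟩]
  exact (skipNZ_fuel_step a n (s + 1) (by omega)).symm

theorem drop_cons_getD (a : List Int) (s : Nat) (h : s < a.length) :
    a.drop s = a.getD s 0 :: a.drop (s + 1) := by
  rw [List.drop_eq_getElem_cons h, List.getD_eq_getElem a 0 h]

-- a zero run: RI with an open run at s0, scanned from s, closes exactly where the inner loop stops
theorem RIz (a : List Int) (k : Nat) : ∀ (s : Nat), a.length - s ≤ k → s ≤ a.length → ∀ (s0 : Int),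
    RI (a.drop s) (s : Int) (some s0)
      = (s0, ((skipZ a s a.length : Nat) : Int)) ::
          RI (a.drop (skipZ a s a.length)) ((skipZ a s a.length : Nat) : Int) none := by
  induction k with
  | zero =>
    intro s hk hs s0
    rw [skipZ_eq_self a a.length s (by omega)]
    rw [List.drop_of_length_le (show a.length ≤ s by omega)]
    simp [RI]
  | succ k ih =>
    intro s hk hs s0
    by_cases hlt : s < a.length
    · by_cases hz : a.getD s 0 = 0
      · rw [skipZ_succ a s hlt hz, drop_cons_getD a s hlt]
        have hcast : ((s : Int) + 1) = ((s + 1 : Nat) : Int) := by push_cast; ring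
        simp only [RI, hz, if_pos, hcast]
        exact ih (s + 1) (by omega) (by omega) s0
      · rw [skipZ_eq_self a a.length s (by tauto), drop_cons_getD a s hlt]
        have hcast : ((s : Int) + 1) = ((s + 1 : Nat) : Int) := by push_cast; ring
        simp only [RI, if_neg hz, hcast]
    · rw [skipZ_eq_self a a.length s (by omega)]
      rw [List.drop_of_length_le (show a.length ≤ s by omega)]
      simp [RI]

-- A's driver from position s computes RI on the suffix (any sufficient fuel)
theorem Amain (a : List Int) (k : Nat) : ∀ (fuel s : Nat), a.length - s ≤ k → a.length - s < fuel →
    s ≤ a.length →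
    (findZerosFrom a fuel s).map (fun p => ((p.1 : Int), (p.2 : Int))) = RI (a.drop s) (s : Int) none := by
  induction k with
  | zero =>
    intro fuel s hk hf hs
    obtain ⟨f, hfe⟩ : ∃ f, fuel = f + 1 := ⟨fuel - 1, by omega⟩
    subst hfe
    have hnone : findZeroA a s = none := by
      unfold findZeroA
      have h1 : skipNZ a s a.length = s := skipNZ_eq_self a a.length s (by omega)
      simp [h1, show ¬ s < a.length by omega]
    rw [findZerosFrom, hnone, List.drop_of_length_le (show a.length ≤ s by omega)]
    simp [RI]
  | succ k ih =>
    intro fuel s hk hf hs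
    obtain ⟨f, hfe⟩ : ∃ f, fuel = f + 1 := ⟨fuel - 1, by omega⟩
    subst hfe
    by_cases hlt : s < a.length
    · by_cases hz : a.getD s 0 = 0
      · -- a[s] = 0 : a run starts here
        have hnz : skipNZ a s a.length = s := skipNZ_eq_self a a.length s (by tauto)
        set e := skipZ a s a.length with he
        have hes : s < e := by
          have h1 := skipZ_succ a s hlt hz
          have h2 := skipZ_ge a a.length (s + 1)
          omega
        have hel : e ≤ a.length := skipZ_le a a.length s (by omega)
        have hfz : findZeroA a s = some (s, e) := by
          unfold findZeroA; simp [hnz, hlt, he]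
        have hze : skipZ a (s + 1) a.length = e := by rw [he, skipZ_succ a s hlt hz]
        have hcast : ((s : Int) + 1) = ((s + 1 : Nat) : Int) := by push_cast; ring
        rw [findZerosFrom, hfz]
        rw [drop_cons_getD a s hlt]
        simp only [RI, hz, if_pos, hcast]
        rw [RIz a (a.length - (s + 1)) (s + 1) (by omega) (by omega) (s : Int), hze]
        by_cases hend : a.length ≤ e
        · have he2 : e = a.length := by omega
          rw [if_pos hend]
          simp [he2, List.drop_length, RI]
        · rw [if_neg hend]
          simp only [List.map_cons]
          rw [ih f e (by omega) (by omega) (by omega)]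
      · -- a[s] ≠ 0 : both sides skip this element, the driver fuel is unchanged
        have h1 : findZeroA a s = findZeroA a (s + 1) := by
          unfold findZeroA
          rw [skipNZ_succ a s hlt hz]
        have h2 : findZerosFrom a (f + 1) s = findZerosFrom a (f + 1) (s + 1) := by
          rw [findZerosFrom]
          conv_rhs => rw [findZerosFrom]
          rw [h1]
        rw [h2, drop_cons_getD a s hlt]
        have hcast : ((s : Int) + 1) = ((s + 1 : Nat) : Int) := by push_cast; ring
        simp only [RI, if_neg hz, hcast]
        exact ih (f + 1) (s + 1) (by omega) (by omega) (by omega)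
    · have hnone : findZeroA a s = none := by
        unfold findZeroA
        have h1 : skipNZ a s a.length = s := skipNZ_eq_self a a.length s (by omega)
        simp [h1, show ¬ s < a.length by omega]
      rw [findZerosFrom, hnone, List.drop_of_length_le (show a.length ≤ s by omega)]
      simp [RI]

-- ===== VERDICT (by name: the statement is the Claim_ definition above) =====
theorem findZeros_spec : Claim_equal_findZeros := by
  intro a _
  unfold Spec_findZeros
  rw [alt_eq_RI]
  have h := Amain a a.length (a.length + 1) 0 (by omega) (by omega) (by omega)
  simpa [findZeros] using h
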